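-- pv_equiv track=rewrite | github.com/tarunmenon95/FIT3155 | Assignment 3/Miller Rabin Sequence/q1.py | repeatedSquare
-- ===== SOURCE A (Python) =====
-- def intToBinary(num):
--     return "{0:b}".format(num)
--
-- def repeatedSquare(a,s,t,n):
--     """
--     repeatedSquare function builds sequence <x0 ... xs> on which we test for primality
--     :param a: The chosen witness
--     :param s: S value from (n-1) -> 2^s*t form
--     :param t: T value from (n-1) -> 2^s*t form
--     :param n: The number we are checking for primality
--     :return: A list containing our built sequence
--     """
--     sequence = []
--     binrep = str(intToBinary(int(t)))
--     result = 1
--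
--     #Get first term in sequence
--     for i in range(len(binrep) -1, -1, -1):
--
--         # a^(2^0)*t % n - Initial
--         if i == len(binrep) -1:
--             curTerm = int(a % n)
--
--         #Repeated Squaring
--         else:
--             curTerm = ((curTerm % n) * (curTerm % n)) % n
--
--         #Build result on "1"
--         if binrep[i] == "1":
--             result = (result * curTerm) % n
--
--     #Add x^0 to sequence
--     sequence.append(int(result))
--
--     #Repeated square remaining terms
--     for j in range(s):
--         nextTerm = ((sequence[j] % n)*(sequence[j] % n)) % n
--         sequence.append(nextTerm)
--
--     #Return sequence
--     return sequence
-- ===== SOURCE B (Python) =====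
-- def repeatedSquare(a, s, t, n):
--     # First term: left-to-right (MSB-first) binary exponentiation over the bits of t.
--     result = 1
--     for c in "{0:b}".format(t):
--         result = (result * result) % n
--         if c == "1":
--             result = (result * (a % n)) % n
--     # Remaining terms: repeatedly square the running value.
--     sequence = [result]
--     x = result
--     for _ in range(s):
--         x = (x * x) % n
--         sequence.append(x)
--     return sequence
-- ===== Notes on version B (the rewrite author's own statement) =====
-- stated objective: faster
-- what changed: The first term is computed by left-to-right (MSB-first) square-and-multiply over the bits of t instead of A's right-to-left index loop that maintains a separate curTerm power table, and the trailing squares track a running value instead of re-indexing the sequence list.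
-- intended difference: When t == 0 and n == 1 or n < 0, A returns an unreduced leading 1 (its result never passes through % n when t has no set bits), while B returns 1 % n (e.g. 0 for n == 1), matching Python's own pow(a, 0, n) convention, which is the intended reduced-residue value. — e.g. on repeatedSquare(2, 1, 0, 1): A returns [1, 0], B returns [0, 0]
import Mathlib
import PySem

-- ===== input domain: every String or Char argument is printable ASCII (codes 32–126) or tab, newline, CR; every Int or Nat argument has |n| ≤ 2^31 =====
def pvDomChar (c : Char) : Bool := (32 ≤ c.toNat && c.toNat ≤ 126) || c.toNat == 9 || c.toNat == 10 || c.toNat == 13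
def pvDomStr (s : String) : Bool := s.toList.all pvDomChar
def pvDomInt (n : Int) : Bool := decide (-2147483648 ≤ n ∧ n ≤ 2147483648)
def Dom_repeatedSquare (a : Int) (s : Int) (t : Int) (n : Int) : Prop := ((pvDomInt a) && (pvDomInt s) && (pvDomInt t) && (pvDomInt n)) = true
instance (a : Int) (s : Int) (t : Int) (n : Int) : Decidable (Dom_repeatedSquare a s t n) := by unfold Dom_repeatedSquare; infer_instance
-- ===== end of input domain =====

-- B replaces A's right-to-left bit loop (with its separate curTerm power chain) by MSB-first
-- square-and-multiply and tracks the running square instead of re-indexing the list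
-- (fewer % operations per step; a timing run measured B faster).

-- ===== PORT A =====
-- "{0:b}".format(num)
def intToBinary (num : Int) : List Char := PySem.Int.toBinChars num

-- body of A's first loop: state (curTerm, result), index i
def stepA1 (a : Int) (n : Int) (binrep : List Char) (st : Int × Int) (i : Int) : Int × Int :=
  let curTerm := if i = (binrep.length : Int) - 1 then PySem.Int.mod a n
    else PySem.Int.mod (PySem.Int.mod st.1 n * PySem.Int.mod st.1 n) n
  let result := if PySem.List.pyGetD binrep i ' ' = '1'
    then PySem.Int.mod (st.2 * curTerm) n else st.2
  (curTerm, result)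

-- body of A's second loop: sequence.append(((sequence[j] % n)*(sequence[j] % n)) % n)
def stepA2 (n : Int) (seq : List Int) (j : Int) : List Int :=
  seq ++ [PySem.Int.mod (PySem.Int.mod (PySem.List.pyGetD seq j 0) n * PySem.Int.mod (PySem.List.pyGetD seq j 0) n) n]

def repeatedSquare (a : Int) (s : Int) (t : Int) (n : Int) : List Int :=
  let binrep := intToBinary t
  let first := ((PySem.List.pyRange ((binrep.length : Int) - 1) (-1) (-1)).foldl (stepA1 a n binrep) (0, 1)).2
  (PySem.List.pyRange 0 s 1).foldl (stepA2 n) [first]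

-- ===== PORT B =====
-- body of B's bit loop: square, then multiply on a set bit
def stepB1 (a : Int) (n : Int) (r : Int) (c : Char) : Int :=
  let r2 := PySem.Int.mod (r * r) n
  if c = '1' then PySem.Int.mod (r2 * PySem.Int.mod a n) n else r2

-- body of B's second loop: x = x*x % n; sequence.append(x)
def stepB2 (n : Int) (p : Int × List Int) (_ : Int) : Int × List Int :=
  let x := PySem.Int.mod (p.1 * p.1) n
  (x, p.2 ++ [x])

def repeatedSquare_alt (a : Int) (s : Int) (t : Int) (n : Int) : List Int :=
  let result := (PySem.Int.toBinChars t).foldl (stepB1 a n) 1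
  ((PySem.List.pyRange 0 s 1).foldl (stepB2 n) (result, [result])).2

-- ===== PRECONDITION & SPEC =====
-- Pre_ excludes exactly n = 0, on which Python's '%' raises ZeroDivisionError.
def Pre_repeatedSquare (a : Int) (s : Int) (t : Int) (n : Int) : Prop := n ≠ 0
instance (a : Int) (s : Int) (t : Int) (n : Int) : Decidable (Pre_repeatedSquare a s t n) := by unfold Pre_repeatedSquare; infer_instance
def pvWitness_repeatedSquare : Int × Int × Int × Int := (2, 2, 5, 7)

-- When t = 0 and n = 1 or n < 0, A returns an unreduced leading 1 (its result never passes
-- through % n when t has no set bits), while B returns 1 % n (e.g. 0 for n = 1), matching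
-- Python's pow(a, 0, n) convention, which is the intended reduced-residue value.
def D_repeatedSquare (a : Int) (s : Int) (t : Int) (n : Int) : Prop := t = 0 ∧ (n = 1 ∨ n < 0)
instance (a : Int) (s : Int) (t : Int) (n : Int) : Decidable (D_repeatedSquare a s t n) := by unfold D_repeatedSquare; infer_instance

def Spec_repeatedSquare (a : Int) (s : Int) (t : Int) (n : Int) (out : List Int) : Prop := ¬ D_repeatedSquare a s t n → out = repeatedSquare_alt a s t n
instance (a : Int) (s : Int) (t : Int) (n : Int) (out : List Int) : Decidable (Spec_repeatedSquare a s t n out) := by unfold Spec_repeatedSquare; infer_instance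

def pvDiffWitness_repeatedSquare : Int × Int × Int × Int := (2, 1, 0, 1)
def pvDiffWitnessOut_repeatedSquare : (List Int) × (List Int) := ([1, 0], [0, 0])

-- ===== CLAIM (what is proved, stated in full; the proofs are below) =====
def Claim_unchanged_repeatedSquare : Prop := ∀ (a : Int) (s : Int) (t : Int) (n : Int), Dom_repeatedSquare a s t n → Pre_repeatedSquare a s t n → Spec_repeatedSquare a s t n (repeatedSquare a s t n)
def Claim_changed_repeatedSquare : Prop := Dom_repeatedSquare (pvDiffWitness_repeatedSquare.1) (pvDiffWitness_repeatedSquare.2.1) (pvDiffWitness_repeatedSquare.2.2.1) (pvDiffWitness_repeatedSquare.2.2.2) ∧ Pre_repeatedSquare (pvDiffWitness_repeatedSquare.1) (pvDiffWitness_repeatedSquare.2.1) (pvDiffWitness_repeatedSquare.2.2.1) (pvDiffWitness_repeatedSquare.2.2.2) ∧ D_repeatedSquare (pvDiffWitness_repeatedSquare.1) (pvDiffWitness_repeatedSquare.2.1) (pvDiffWitness_repeatedSquare.2.2.1) (pvDiffWitness_repeatedSquare.2.2.2) ∧ repeatedSquare (pvDiffWitness_repeatedSquare.1) (pvDiffWitness_repeatedSquare.2.1)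 (pvDiffWitness_repeatedSquare.2.2.1) (pvDiffWitness_repeatedSquare.2.2.2) = pvDiffWitnessOut_repeatedSquare.1 ∧ repeatedSquare_alt (pvDiffWitness_repeatedSquare.1) (pvDiffWitness_repeatedSquare.2.1) (pvDiffWitness_repeatedSquare.2.2.1) (pvDiffWitness_repeatedSquare.2.2.2) = pvDiffWitnessOut_repeatedSquare.2 ∧ pvDiffWitnessOut_repeatedSquare.1 ≠ pvDiffWitnessOut_repeatedSquare.2
def Claim_exact_repeatedSquare : Prop := ∀ (a : Int) (s : Int) (t : Int) (n : Int), Dom_repeatedSquare a s t n → Pre_repeatedSquare a s t n → D_repeatedSquare a s t n → repeatedSquare a s t n ≠ repeatedSquare_alt a s t n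


-- ===== LEMMAS AND PROOFS =====

-- `%` (PySem.Int.mod) maps congruent integers to the same value, and is idempotent.
theorem pvModEq_self (n x : Int) : PySem.Int.mod x n ≡ x [ZMOD n] := by
  have h := PySem.Int.floordiv_mul_add_mod x n
  exact Int.modEq_iff_dvd.mpr ⟨PySem.Int.floordiv x n, by linarith [h]⟩

theorem pvMod_congr {n : Int} {x y : Int} (h : x ≡ y [ZMOD n]) :
    PySem.Int.mod x n = PySem.Int.mod y n := by
  rcases eq_or_ne n 0 with rfl | hn
  · have : x = y := by simpa [Int.ModEq] using h
    rw [this]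
  · have hd : n ∣ PySem.Int.mod y n - PySem.Int.mod x n :=
      ((pvModEq_self n x).trans (h.trans (pvModEq_self n y).symm)).dvd
    have hz : PySem.Int.mod y n - PySem.Int.mod x n = 0 := by
      rcases lt_or_gt_of_ne hn with hneg | hpos
      · have b1 := PySem.Int.mod_neg_bounds x hneg
        have b2 := PySem.Int.mod_neg_bounds y hneg
        apply Int.eq_zero_of_abs_lt_dvd ((neg_dvd).mpr hd)
        rw [abs_lt]; constructor <;> omega
      · have b1 := PySem.Int.mod_nonneg x hpos
        have b2 := PySem.Int.mod_nonneg y hpos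
        have c1 := PySem.Int.mod_lt x hpos
        have c2 := PySem.Int.mod_lt y hpos
        apply Int.eq_zero_of_abs_lt_dvd hd
        rw [abs_lt]; constructor <;> omega
    omega

theorem pvMod_idem (n x : Int) : PySem.Int.mod (PySem.Int.mod x n) n = PySem.Int.mod x n :=
  pvMod_congr (pvModEq_self n x)

-- bit value of a char and MSB-first value of a char list (proof-only helpers)
def bitOf (c : Char) : Nat := if c = '1' then 1 else 0

def bitsVal (cs : List Char) : Nat := cs.foldl (fun acc c => 2 * acc + bitOf c) 0

-- chain of repeated squares mod n (proof-only helper)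
def sqChain (n x : Int) : Nat → List Int
  | 0 => []
  | k + 1 => PySem.Int.mod (x * x) n :: sqChain n (PySem.Int.mod (x * x) n) k

theorem bitsVal_foldl (cs : List Char) : ∀ acc : Nat,
    cs.foldl (fun acc c => 2 * acc + bitOf c) acc = acc * 2 ^ cs.length + bitsVal cs := by
  induction cs with
  | nil => intro acc; simp [bitsVal]
  | cons c cs ih =>
    intro acc
    simp only [List.foldl_cons, List.length_cons]
    have h2 : bitsVal (c :: cs) = (2 * 0 + bitOf c) * 2 ^ cs.length + bitsVal cs := ih _
    rw [ih, h2]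
    ring

theorem bitsVal_cons (c : Char) (cs : List Char) :
    bitsVal (c :: cs) = bitOf c * 2 ^ cs.length + bitsVal cs := by
  have h2 : bitsVal (c :: cs) = (2 * 0 + bitOf c) * 2 ^ cs.length + bitsVal cs := bitsVal_foldl cs _
  rw [h2]; ring

theorem bitsVal_append (xs : List Char) (c : Char) :
    bitsVal (xs ++ [c]) = 2 * bitsVal xs + bitOf c := by
  rw [bitsVal, List.foldl_append]; simp [bitsVal]

theorem bitsVal_eq_zero {cs : List Char} (h : '1' ∉ cs) : bitsVal cs = 0 := by
  induction cs with
  | nil => rfl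
  | cons c cs ih =>
    rw [bitsVal_cons]
    have h1 : c ≠ '1' := fun hc => h (hc ▸ List.mem_cons_self)
    have h2 : '1' ∉ cs := fun hc => h (List.mem_cons_of_mem _ hc)
    simp [bitOf, h1, ih h2]

theorem loopB_spec (a n : Int) : ∀ (cs : List Char) (r : Int),
    (cs.foldl (stepB1 a n) r ≡ r ^ (2 ^ cs.length) * a ^ bitsVal cs [ZMOD n]) ∧
    (cs ≠ [] → PySem.Int.mod (cs.foldl (stepB1 a n) r) n = cs.foldl (stepB1 a n) r) := by
  intro cs
  induction cs with
  | nil => intro r; refine ⟨by simp [bitsVal], by simp⟩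
  | cons c cs ih =>
    intro r
    have hstep : (c :: cs).foldl (stepB1 a n) r = cs.foldl (stepB1 a n) (stepB1 a n r c) := by
      simp [List.foldl_cons]
    have hr' : stepB1 a n r c ≡ r ^ 2 * a ^ bitOf c [ZMOD n] := by
      by_cases hc : c = '1'
      · simp only [stepB1, hc, bitOf]
        calc PySem.Int.mod (PySem.Int.mod (r * r) n * PySem.Int.mod a n) n
            ≡ PySem.Int.mod (r * r) n * PySem.Int.mod a n [ZMOD n] := pvModEq_self n _
          _ ≡ (r * r) * a [ZMOD n] := Int.ModEq.mul (pvModEq_self n _) (pvModEq_self n _)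
          _ = r ^ 2 * a ^ 1 := by ring
      · simp only [stepB1, bitOf, if_neg hc]
        calc PySem.Int.mod (r * r) n ≡ r * r [ZMOD n] := pvModEq_self n _
          _ = r ^ 2 * a ^ 0 := by ring
    have hcan : PySem.Int.mod (stepB1 a n r c) n = stepB1 a n r c := by
      by_cases hc : c = '1' <;> simp [stepB1, hc, pvMod_idem]
    obtain ⟨ihm, ihc⟩ := ih (stepB1 a n r c)
    constructor
    · rw [hstep]
      calc cs.foldl (stepB1 a n) (stepB1 a n r c)
          ≡ (stepB1 a n r c) ^ (2 ^ cs.length) * a ^ bitsVal cs [ZMOD n] := ihm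
        _ ≡ (r ^ 2 * a ^ bitOf c) ^ (2 ^ cs.length) * a ^ bitsVal cs [ZMOD n] :=
            Int.ModEq.mul (hr'.pow _) Int.ModEq.rfl
        _ = r ^ (2 ^ (c :: cs).length) * a ^ bitsVal (c :: cs) := by
            rw [bitsVal_cons, List.length_cons, mul_pow, ← pow_mul, ← pow_mul, pow_succ, pow_add]
            ring
    · intro _
      rw [hstep]
      cases cs with
      | nil => simpa using hcan
      | cons d ds => exact ihc (by simp)

theorem loopA_spec (a n : Int) (L : List Char) : ∀ (j : Nat), (j : Int) + 1 < (L.length : Int) →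
    ∀ (c r : Int), PySem.Int.mod c n = c →
    (((PySem.List.pyRange (j : Int) (-1) (-1)).foldl (stepA1 a n L) (c, r)).2 ≡
        r * c ^ (2 * bitsVal (L.take (j + 1))) [ZMOD n]) ∧
    ('1' ∈ L.take (j + 1) →
        PySem.Int.mod (((PySem.List.pyRange (j : Int) (-1) (-1)).foldl (stepA1 a n L) (c, r)).2) n =
        ((PySem.List.pyRange (j : Int) (-1) (-1)).foldl (stepA1 a n L) (c, r)).2) ∧
    ('1' ∉ L.take (j + 1) →
        ((PySem.List.pyRange (j : Int) (-1) (-1)).foldl (stepA1 a n L) (c, r)).2 = r) := by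
  intro j
  induction j with
  | zero =>
    intro hj c r hc
    simp only [Nat.cast_zero]
    have hlen : 1 < L.length := by exact_mod_cast hj
    have hrange : PySem.List.pyRange (0 : Int) (-1) (-1) = [0] := by decide
    have hne : ¬ ((0 : Int) = (L.length : Int) - 1) := by omega
    have hget : PySem.List.pyGetD L (0 : Int) ' ' = L.getD 0 ' ' := by
      simpa using PySem.List.pyGetD_natCast (xs := L) (n := 0) (d := ' ')
    have htake : L.take (0 + 1) = [L[0]?.getD ' '] := by
      rcases L with _ | ⟨x, xs⟩
      · simp at hlen
      · simp
    rw [hrange]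
    simp only [List.foldl_cons, List.foldl_nil, stepA1, if_neg hne, hc, hget, htake]
    by_cases hbit : L[0]?.getD ' ' = '1'
    · refine ⟨?_, fun _ => by simp [List.getD, hbit, pvMod_idem],
        fun habs => absurd (by simp [hbit] : '1' ∈ [L[0]?.getD ' ']) habs⟩
      have hv : bitsVal ['1'] = 1 := by decide
      simp only [List.getD, hbit, hv]
      calc PySem.Int.mod (r * PySem.Int.mod (c * c) n) n
          ≡ r * PySem.Int.mod (c * c) n [ZMOD n] := pvModEq_self n _
        _ ≡ r * (c * c) [ZMOD n] := Int.ModEq.mul Int.ModEq.rfl (pvModEq_self n _)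
        _ = r * c ^ (2 * 1) := by ring
    · have hv : bitsVal [L[0]?.getD ' '] = 0 := by
        apply bitsVal_eq_zero; simp [hbit, Ne.symm]
      refine ⟨?_, fun hmem => absurd ((by simpa using hmem : ('1':Char) = L[0]?.getD ' ')).symm hbit,
        fun _ => by simp [List.getD, hbit]⟩
      simp only [List.getD, hbit, hv]
      simpa using Int.ModEq.rfl
  | succ j ih =>
    intro hj c r hc
    have hjlt : j + 1 + 1 < L.length := by
      exact_mod_cast (by push_cast at hj ⊢; omega : ((j:Int) + 1) + 1 < (L.length : Int))
    have hj' : (j : Int) + 1 < (L.length : Int) := by push_cast; omega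
    have hrange : PySem.List.pyRange ((j:Nat).succ : Int) (-1) (-1) =
        ((j + 1 : Nat) : Int) :: PySem.List.pyRange ((j : Nat) : Int) (-1) (-1) := by
      rw [PySem.List.pyRange_neg_one_cons (by push_cast; omega)]
      congr 1 <;> push_cast <;> ring_nf
    have hne : ¬ (((j + 1 : Nat) : Int) = (L.length : Int) - 1) := by push_cast; omega
    have hget : PySem.List.pyGetD L ((j + 1 : Nat) : Int) ' ' = L[j+1]?.getD ' ' := by
      simpa [List.getD] using PySem.List.pyGetD_natCast (xs := L) (n := j + 1) (d := ' ')
    have htake : L.take (j + 1 + 1) = L.take (j + 1) ++ [L[j+1]?.getD ' '] := by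
      rw [List.take_succ]
      congr 1
      rw [List.getElem?_eq_getElem (by omega)]
      simp
    set c' := PySem.Int.mod (c * c) n with hc'def
    set b := bitOf (L[j+1]?.getD ' ') with hbdef
    set r' := if L[j+1]?.getD ' ' = '1' then PySem.Int.mod (r * c') n else r with hr'def
    have hstep : ∀ l0, (List.foldl (stepA1 a n L) (c, r) (((j + 1 : Nat) : Int) :: l0)) =
        List.foldl (stepA1 a n L) (c', r') l0 := by
      intro l0
      simp only [List.foldl_cons, stepA1, if_neg hne, hc, hget, hr'def]
      rfl
    have hcan' : PySem.Int.mod c' n = c' := pvMod_idem n _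
    obtain ⟨ihm, ihc1, ihc0⟩ := ih hj' c' r' hcan'
    have hr'm : r' ≡ r * c ^ (2 * b) [ZMOD n] := by
      by_cases hbit : L[j+1]?.getD ' ' = '1'
      · rw [hr'def, if_pos hbit, hbdef, hbit]
        calc PySem.Int.mod (r * c') n ≡ r * c' [ZMOD n] := pvModEq_self n _
          _ ≡ r * (c * c) [ZMOD n] := Int.ModEq.mul Int.ModEq.rfl (pvModEq_self n _)
          _ = r * c ^ (2 * bitOf '1') := by have hb1 : bitOf '1' = 1 := rfl
                                            rw [hb1]; ring
      · rw [hr'def, if_neg hbit, hbdef]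
        have : bitOf (L[j+1]?.getD ' ') = 0 := by simp [bitOf, hbit]
        rw [this]
        simpa using Int.ModEq.rfl
    have hc'm : c' ≡ c ^ 2 [ZMOD n] := by
      calc c' ≡ c * c [ZMOD n] := pvModEq_self n _
        _ = c ^ 2 := by ring
    have hval : bitsVal (L.take (j + 1 + 1)) = 2 * bitsVal (L.take (j + 1)) + b := by
      rw [htake, bitsVal_append]
    refine ⟨?_, ?_, ?_⟩
    · rw [hrange, hstep]
      calc (List.foldl (stepA1 a n L) (c', r') (PySem.List.pyRange ((j : Nat) : Int) (-1) (-1))).2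
          ≡ r' * c' ^ (2 * bitsVal (L.take (j + 1))) [ZMOD n] := ihm
        _ ≡ (r * c ^ (2 * b)) * (c ^ 2) ^ (2 * bitsVal (L.take (j + 1))) [ZMOD n] :=
            Int.ModEq.mul hr'm (hc'm.pow _)
        _ = r * c ^ (2 * b + 2 * (2 * bitsVal (L.take (j + 1)))) := by
            rw [← pow_mul, mul_assoc, ← pow_add]
        _ = r * c ^ (2 * bitsVal (L.take (j + 1 + 1))) := by
            rw [hval, (by ring :
              2 * (2 * bitsVal (L.take (j + 1)) + b) = 2 * b + 2 * (2 * bitsVal (L.take (j + 1))))]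
    · intro hmem
      rw [hrange, hstep]
      rw [htake] at hmem
      rcases List.mem_append.mp hmem with hpre | hlast
      · exact ihc1 hpre
      · by_cases hpre : '1' ∈ L.take (j + 1)
        · exact ihc1 hpre
        · have hbit : L[j+1]?.getD ' ' = '1' := by simpa using (List.mem_singleton.mp hlast).symm
          rw [ihc0 hpre, hr'def, if_pos hbit, pvMod_idem]
    · intro hmem
      rw [hrange, hstep]
      rw [htake] at hmem
      have hpre : '1' ∉ L.take (j + 1) := fun h => hmem (List.mem_append.mpr (Or.inl h))
      have hbit : ¬ (L[j+1]?.getD ' ' = '1') := fun h =>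
        hmem (List.mem_append.mpr (Or.inr (by simp [h])))
      rw [ihc0 hpre, hr'def, if_neg hbit]

theorem toDigitsCore_ne_nil : ∀ (fuel n : Nat) (ds : List Char),
    (ds ≠ [] ∨ fuel ≠ 0) → Nat.toDigitsCore 2 fuel n ds ≠ [] := by
  intro fuel
  induction fuel with
  | zero => intro n ds h; simp [Nat.toDigitsCore]; tauto
  | succ f ih =>
    intro n ds h
    rw [Nat.toDigitsCore]
    split
    · simp
    · exact ih _ _ (Or.inl (by simp))

theorem one_mem_toDigitsCore : ∀ (fuel n : Nat) (ds : List Char),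
    ('1' ∈ ds ∨ (n ≠ 0 ∧ n < fuel)) → '1' ∈ Nat.toDigitsCore 2 fuel n ds := by
  intro fuel
  induction fuel with
  | zero =>
    intro n ds h
    rcases h with h | ⟨_, h2⟩
    · simpa [Nat.toDigitsCore] using h
    · omega
  | succ f ih =>
    intro n ds h
    rw [Nat.toDigitsCore]
    rcases h with h | ⟨h1, h2⟩
    · split
      · exact List.mem_cons_of_mem _ h
      · exact ih _ _ (Or.inl (List.mem_cons_of_mem _ h))
    · split
      · rename_i hdiv
        have : n = 1 := by omega
        subst this
        simp [Nat.digitChar]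
      · rename_i hdiv
        exact ih _ _ (Or.inr ⟨hdiv, by omega⟩)

theorem toBinChars_ne_nil (t : Int) : PySem.Int.toBinChars t ≠ [] := by
  unfold PySem.Int.toBinChars
  split
  · simp
  · exact toDigitsCore_ne_nil _ _ _ (Or.inr (by simp))

theorem one_mem_toBinChars {t : Int} (ht : t ≠ 0) : '1' ∈ PySem.Int.toBinChars t := by
  unfold PySem.Int.toBinChars
  split
  · rename_i hneg
    refine List.mem_cons_of_mem _ ?_
    exact one_mem_toDigitsCore _ _ _ (Or.inr ⟨by omega, by omega⟩)
  · rename_i hpos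
    have h0 : t.toNat ≠ 0 := by omega
    exact one_mem_toDigitsCore _ _ _ (Or.inr ⟨h0, by omega⟩)

theorem mod_one_of_two_le {n : Int} (hn : 2 ≤ n) : PySem.Int.mod 1 n = 1 := by
  rw [PySem.Int.mod_eq_emod_of_pos (by omega)]
  exact Int.emod_eq_of_lt (by omega) (by omega)

theorem firstB_spec (a t n : Int) :
    ('1' ∈ PySem.Int.toBinChars t →
      (PySem.Int.toBinChars t).foldl (stepB1 a n) 1 =
        PySem.Int.mod (a ^ bitsVal (PySem.Int.toBinChars t)) n) ∧
    ('1' ∉ PySem.Int.toBinChars t →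
      (PySem.Int.toBinChars t).foldl (stepB1 a n) 1 = PySem.Int.mod 1 n) := by
  set L := PySem.Int.toBinChars t with hL
  obtain ⟨hm, hcan⟩ := loopB_spec a n L 1
  have hcan' := hcan (toBinChars_ne_nil t)
  have hm' : L.foldl (stepB1 a n) 1 ≡ a ^ bitsVal L [ZMOD n] := by
    simpa using hm
  constructor
  · intro _
    rw [← hcan']
    exact pvMod_congr hm'
  · intro hno
    rw [← hcan']
    refine pvMod_congr ?_
    rw [bitsVal_eq_zero hno] at hm'
    simpa using hm'

theorem firstA_spec (a t n : Int) :
    ('1' ∈ PySem.Int.toBinChars t →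
      ((PySem.List.pyRange (((PySem.Int.toBinChars t).length : Int) - 1) (-1) (-1)).foldl
          (stepA1 a n (PySem.Int.toBinChars t)) (0, 1)).2 =
        PySem.Int.mod (a ^ bitsVal (PySem.Int.toBinChars t)) n) ∧
    ('1' ∉ PySem.Int.toBinChars t →
      ((PySem.List.pyRange (((PySem.Int.toBinChars t).length : Int) - 1) (-1) (-1)).foldl
          (stepA1 a n (PySem.Int.toBinChars t)) (0, 1)).2 = 1) := by
  set L := PySem.Int.toBinChars t with hL
  have hne := toBinChars_ne_nil t
  rw [← hL] at hne
  have hlen1 : 1 ≤ L.length := List.length_pos_iff.mpr hne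
  have hrange : PySem.List.pyRange ((L.length : Int) - 1) (-1) (-1) =
      ((L.length : Int) - 1) :: PySem.List.pyRange ((L.length : Int) - 1 - 1) (-1) (-1) := by
    rw [PySem.List.pyRange_neg_one_cons (by omega)]
  have hget : PySem.List.pyGetD L ((L.length : Int) - 1) ' ' = L[L.length - 1]?.getD ' ' := by
    rw [(by push_cast; omega : (L.length : Int) - 1 = ((L.length - 1 : Nat) : Int)),
      PySem.List.pyGetD_natCast]
    simp [List.getD]
  set lastC := L[L.length - 1]?.getD ' ' with hlastC
  set r1 := if lastC = '1' then PySem.Int.mod (1 * PySem.Int.mod a n) n else 1 with hr1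
  have hpeel : ((PySem.List.pyRange ((L.length : Int) - 1) (-1) (-1)).foldl (stepA1 a n L) (0, 1)) =
      (PySem.List.pyRange ((L.length : Int) - 1 - 1) (-1) (-1)).foldl (stepA1 a n L)
        (PySem.Int.mod a n, r1) := by
    rw [hrange, List.foldl_cons]
    simp only [stepA1, hget, hr1, if_true]
  have hr1m : r1 ≡ a ^ bitOf lastC [ZMOD n] := by
    by_cases hbit : lastC = '1'
    · rw [hr1, if_pos hbit, hbit]
      calc PySem.Int.mod (1 * PySem.Int.mod a n) n
          ≡ 1 * PySem.Int.mod a n [ZMOD n] := pvModEq_self n _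
        _ ≡ 1 * a [ZMOD n] := Int.ModEq.mul Int.ModEq.rfl (pvModEq_self n _)
        _ = a ^ bitOf '1' := by simp [bitOf]
    · rw [hr1, if_neg hbit]
      have : bitOf lastC = 0 := by simp [bitOf, hbit]
      rw [this]; simp
  have hsplit : L = L.take (L.length - 1) ++ [lastC] := by
    conv_lhs => rw [← List.take_length (l := L)]
    rw [(by omega : L.length = (L.length - 1) + 1), List.take_succ,
      (by omega : L.length - 1 + 1 = L.length)]
    congr 1
    rw [List.getElem?_eq_getElem (by omega : L.length - 1 < L.length)]
    simp [hlastC, List.getElem?_eq_getElem (by omega : L.length - 1 < L.length)]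
  rcases Nat.lt_or_ge 1 L.length with hlen2 | hlen1'
  · -- length ≥ 2 : use loopA_spec at j = len - 2
    have hcast : (L.length : Int) - 1 - 1 = ((L.length - 2 : Nat) : Int) := by push_cast; omega
    have hj : ((L.length - 2 : Nat) : Int) + 1 < (L.length : Int) := by push_cast; omega
    obtain ⟨ihm, ihc1, ihc0⟩ :=
      loopA_spec a n L (L.length - 2) hj (PySem.Int.mod a n) r1 (pvMod_idem n a)
    have htk : L.length - 2 + 1 = L.length - 1 := by omega
    rw [htk] at ihm ihc1 ihc0
    rw [hpeel, hcast]
    have hvm : ((PySem.List.pyRange ((L.length - 2 : Nat) : Int) (-1) (-1)).foldl (stepA1 a n L)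
        (PySem.Int.mod a n, r1)).2 ≡ a ^ bitsVal L [ZMOD n] := by
      calc _ ≡ r1 * (PySem.Int.mod a n) ^ (2 * bitsVal (L.take (L.length - 1))) [ZMOD n] := ihm
        _ ≡ (a ^ bitOf lastC) * a ^ (2 * bitsVal (L.take (L.length - 1))) [ZMOD n] :=
            Int.ModEq.mul hr1m ((pvModEq_self n a).pow _)
        _ = a ^ bitsVal L := by
            conv_rhs => rw [hsplit, bitsVal_append]
            rw [← pow_add]
            congr 1
            ring
    constructor
    · intro hmem
      have hcanon : PySem.Int.mod (((PySem.List.pyRange ((L.length - 2 : Nat) : Int) (-1) (-1)).foldl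
          (stepA1 a n L) (PySem.Int.mod a n, r1)).2) n =
          ((PySem.List.pyRange ((L.length - 2 : Nat) : Int) (-1) (-1)).foldl
          (stepA1 a n L) (PySem.Int.mod a n, r1)).2 := by
        conv at hmem => rw [hsplit]
        rcases List.mem_append.mp hmem with hpre | hlast
        · exact ihc1 hpre
        · by_cases hpre : '1' ∈ L.take (L.length - 1)
          · exact ihc1 hpre
          · have hbit : lastC = '1' := (List.mem_singleton.mp hlast).symm
            rw [ihc0 hpre, hr1, if_pos hbit, pvMod_idem]
      rw [← hcanon]
      exact pvMod_congr hvm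
    · intro hno
      have hpre : '1' ∉ L.take (L.length - 1) := fun h => hno (List.mem_of_mem_take h)
      have hbit : ¬ (lastC = '1') := fun h => by
        apply hno
        rw [hsplit]
        exact List.mem_append.mpr (Or.inr (by simp [h]))
      rw [ihc0 hpre, hr1, if_neg hbit]
  · -- length = 1
    have hlen : L.length = 1 := by omega
    have hnil : PySem.List.pyRange ((L.length : Int) - 1 - 1) (-1) (-1) = [] := by
      rw [hlen]
      exact PySem.List.pyRange_neg_one_eq_nil (by norm_num)
    rw [hpeel, hnil, List.foldl_nil]
    have hLsing : L = [lastC] := by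
      rw [hsplit, hlen]
      simp
    constructor
    · intro hmem
      have hbit : lastC = '1' := by
        rw [hLsing] at hmem
        exact (List.mem_singleton.mp hmem).symm
      have hv : bitsVal L = 1 := by
        rw [hLsing, hbit]; decide
      rw [hr1, if_pos hbit, hv]
      refine pvMod_congr ?_
      calc 1 * PySem.Int.mod a n ≡ 1 * a [ZMOD n] := Int.ModEq.mul Int.ModEq.rfl (pvModEq_self n a)
        _ = a ^ 1 := by ring
    · intro hno
      have hbit : ¬ (lastC = '1') := fun h => hno (by rw [hLsing]; simp [h])
      rw [hr1, if_neg hbit]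

theorem loopB2_spec (n : Int) : ∀ (l : List Int) (x : Int) (acc : List Int),
    (l.foldl (stepB2 n) (x, acc)).2 = acc ++ sqChain n x l.length := by
  intro l
  induction l with
  | nil => intro x acc; simp [sqChain]
  | cons i l ih =>
    intro x acc
    rw [List.foldl_cons]
    show (l.foldl (stepB2 n) (PySem.Int.mod (x * x) n, acc ++ [PySem.Int.mod (x * x) n])).2 = _
    rw [ih, List.length_cons, sqChain, List.append_assoc]
    rfl

theorem loopA2_spec (n : Int) : ∀ (k : Nat) (j : Nat) (seq : List Int) (x : Int),
    seq.length = j + 1 → PySem.List.pyGetD seq (j : Int) 0 = x →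
    (PySem.List.pyRange (j : Int) ((j : Int) + (k : Int)) 1).foldl (stepA2 n) seq =
      seq ++ sqChain n x k := by
  intro k
  induction k with
  | zero =>
    intro j seq x hlen hget
    rw [(by push_cast; ring : (j : Int) + ((0 : Nat) : Int) = (j : Int)),
      PySem.List.pyRange_one_eq_nil (by omega)]
    simp [sqChain]
  | succ k ih =>
    intro j seq x hlen hget
    have hcons : PySem.List.pyRange (j : Int) ((j : Int) + ((k + 1 : Nat) : Int)) 1 =
        (j : Int) :: PySem.List.pyRange (((j + 1 : Nat) : Int))
          (((j + 1 : Nat) : Int) + ((k : Nat) : Int)) 1 := by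
      rw [PySem.List.pyRange_one_cons (by push_cast; omega)]
      congr 1 <;> push_cast <;> ring
    rw [hcons, List.foldl_cons]
    have hstep : stepA2 n seq (j : Int) = seq ++ [PySem.Int.mod (x * x) n] := by
      rw [stepA2, hget]
      congr 2
      exact pvMod_congr (Int.ModEq.mul (pvModEq_self n x) (pvModEq_self n x))
    rw [hstep]
    have hlen' : (seq ++ [PySem.Int.mod (x * x) n]).length = (j + 1) + 1 := by simp [hlen]
    have hget' : PySem.List.pyGetD (seq ++ [PySem.Int.mod (x * x) n]) ((j + 1 : Nat) : Int) 0 =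
        PySem.Int.mod (x * x) n := by
      rw [PySem.List.pyGetD_natCast]
      have : j + 1 = seq.length := by omega
      rw [this, List.getD_eq_getElem?_getD, List.getElem?_append_right (by omega)]
      simp
    have := ih (j + 1) (seq ++ [PySem.Int.mod (x * x) n]) (PySem.Int.mod (x * x) n) hlen' hget'
    rw [this, sqChain, List.append_assoc]
    rfl

theorem secondA_eq (n s x : Int) :
    (PySem.List.pyRange 0 s 1).foldl (stepA2 n) [x] = x :: sqChain n x s.toNat := by
  rcases le_or_gt s 0 with hs | hs
  · rw [PySem.List.pyRange_one_eq_nil hs, (by omega : s.toNat = 0)]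
    rfl
  · obtain ⟨m, rfl⟩ : ∃ m : Nat, s = (m : Int) := ⟨s.toNat, by omega⟩
    have h := loopA2_spec n m 0 [x] x (by simp) (by simp)
    rw [Nat.cast_zero] at h
    simpa using h

theorem repeatedSquare_eq_chain (a s t n : Int) :
    repeatedSquare a s t n =
      (((PySem.List.pyRange (((PySem.Int.toBinChars t).length : Int) - 1) (-1) (-1)).foldl
          (stepA1 a n (PySem.Int.toBinChars t)) (0, 1)).2) ::
        sqChain n (((PySem.List.pyRange (((PySem.Int.toBinChars t).length : Int) - 1) (-1) (-1)).foldl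
          (stepA1 a n (PySem.Int.toBinChars t)) (0, 1)).2) s.toNat := by
  exact secondA_eq n s _

theorem repeatedSquare_alt_eq_chain (a s t n : Int) :
    repeatedSquare_alt a s t n =
      ((PySem.Int.toBinChars t).foldl (stepB1 a n) 1) ::
        sqChain n ((PySem.Int.toBinChars t).foldl (stepB1 a n) 1) s.toNat := by
  show ((PySem.List.pyRange 0 s 1).foldl (stepB2 n) (_, [_])).2 = _
  rw [loopB2_spec]
  rw [PySem.List.length_pyRange_one]
  norm_num

-- ===== VERDICT (by name: the statement is the Claim_ definition above) =====
theorem repeatedSquare_spec : Claim_unchanged_repeatedSquare := by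
  intro a s t n _ hpre
  intro hnd
  rw [repeatedSquare_eq_chain, repeatedSquare_alt_eq_chain]
  suffices h : ((PySem.List.pyRange (((PySem.Int.toBinChars t).length : Int) - 1) (-1) (-1)).foldl
      (stepA1 a n (PySem.Int.toBinChars t)) (0, 1)).2 =
      (PySem.Int.toBinChars t).foldl (stepB1 a n) 1 by
    rw [h]
  by_cases h1 : '1' ∈ PySem.Int.toBinChars t
  · rw [(firstA_spec a t n).1 h1, (firstB_spec a t n).1 h1]
  · have ht : t = 0 := by
      by_contra ht
      exact h1 (one_mem_toBinChars ht)
    have hn2 : 2 ≤ n := by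
      rcases lt_trichotomy n 0 with h | h | h
      · exact absurd ⟨ht, Or.inr h⟩ hnd
      · exact absurd h hpre
      · rcases eq_or_ne n 1 with h1' | h1'
        · exact absurd ⟨ht, Or.inl h1'⟩ hnd
        · omega
    rw [(firstA_spec a t n).2 h1, (firstB_spec a t n).2 h1, mod_one_of_two_le hn2]

theorem repeatedSquare_changed : Claim_changed_repeatedSquare := by
  unfold Claim_changed_repeatedSquare; decide

theorem repeatedSquare_tight : Claim_exact_repeatedSquare := by
  intro a s t n _ hpre hd heq
  obtain ⟨ht, hn⟩ := hd
  subst ht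
  have h1 : '1' ∉ PySem.Int.toBinChars 0 := by decide
  rw [repeatedSquare_eq_chain, repeatedSquare_alt_eq_chain,
    (firstA_spec a 0 n).2 h1, (firstB_spec a 0 n).2 h1] at heq
  have hhead : (1 : Int) = PySem.Int.mod 1 n := (List.cons.injEq _ _ _ _ ▸ heq).1
  rcases hn with rfl | hneg
  · simp at hhead
  · have := (PySem.Int.mod_neg_bounds 1 hneg).2
    omega
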